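-- pv_equiv track=rewrite | github.com/Smith-012/python_projects | Contact_Book/contact_book_gui.py | titlecase_letters_and_spaces
-- ===== SOURCE A (Python) =====
-- def titlecase_letters_and_spaces(text: str) -> str:
--     """
--     Keep only letters and spaces (extra chars removed),
--     lowercase everything then capitalize first letter of each word.
--     """
--     filtered = "".join(ch for ch in text if (ch.isalpha() or ch.isspace()))
--     filtered = filtered.lower()
--     # manual title-casing so multiple spaces are handled
--     out = []
--     prev_space = True
--     for ch in filtered:
--         if prev_space and ch.isalpha():
--             out.append(ch.upper())
--             prev_space = False
--         else:
--             out.append(ch)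
--             prev_space = ch.isspace()
--     return "".join(out)
-- ===== SOURCE B (Python) =====
-- def titlecase_letters_and_spaces(text: str) -> str:
--     f = "".join(ch for ch in text if ch.isalpha() or ch.isspace()).lower()
--     # split the filtered text into maximal runs of same-kind chars (space / non-space)
--     runs = []
--     i, n = 0, len(f)
--     while i < n:
--         j = i + 1
--         while j < n and f[j].isspace() == f[i].isspace():
--             j += 1
--         runs.append(f[i:j])
--         i = j
--     # whitespace runs unchanged; each word run gets its first char uppercased
--     return "".join(r if r[0].isspace() else r[0].upper() + r[1:] for r in runs)
-- ===== Notes on version B (the rewrite author's own statement) =====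
-- stated objective: alternative
-- what changed: Replaced A's char-by-char prev_space state machine with a run-based algorithm: split the filtered lowercased text into maximal runs of same spaceness, keep whitespace runs, and uppercase the first character of each word run.
import Mathlib
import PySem

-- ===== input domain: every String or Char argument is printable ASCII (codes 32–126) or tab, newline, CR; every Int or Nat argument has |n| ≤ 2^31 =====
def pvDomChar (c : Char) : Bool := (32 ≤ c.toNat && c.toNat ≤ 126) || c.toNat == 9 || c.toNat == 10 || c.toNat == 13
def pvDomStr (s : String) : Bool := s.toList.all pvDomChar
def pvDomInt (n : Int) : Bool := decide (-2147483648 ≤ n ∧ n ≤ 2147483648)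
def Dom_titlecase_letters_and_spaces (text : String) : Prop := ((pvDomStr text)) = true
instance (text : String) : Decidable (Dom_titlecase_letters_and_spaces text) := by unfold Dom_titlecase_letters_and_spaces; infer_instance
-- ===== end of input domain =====

-- B replaces A's prev_space state machine by a run-based algorithm: split the filtered
-- lowercased text into maximal same-spaceness runs, uppercase the first char of each
-- word run (objective: alternative decomposition, same cost).

-- ===== PORT A =====
def titlecase_letters_and_spaces (text : String) : String :=
  let filtered := text.toList.filter (fun ch => PySem.Chars.isalpha ch || PySem.Chars.isspace ch)
  let filtered2 := PySem.Chars.lower filtered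
  let res := filtered2.foldl
      (fun (st : List Char × Bool) ch =>
        if st.2 && PySem.Chars.isalpha ch then (st.1 ++ [PySem.Chars.upperChar ch], false)
        else (st.1 ++ [ch], PySem.Chars.isspace ch)) ([], true)
  String.ofList res.1

-- ===== PORT B =====
-- Source B's inner while loop extends the current run while spaceness matches the run's
-- first char; ported as takeWhile (run body) / dropWhile (rest), recursing on the rest.
def pvRuns : List Char → List (List Char)
  | [] => []
  | c :: cs =>
      (c :: cs.takeWhile (fun x => PySem.Chars.isspace x == PySem.Chars.isspace c))
        :: pvRuns (cs.dropWhile (fun x => PySem.Chars.isspace x == PySem.Chars.isspace c))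
termination_by l => l.length
decreasing_by
  simpa using Nat.lt_succ_of_le ((List.dropWhile_sublist _).length_le)

-- r if r[0].isspace() else r[0].upper() + r[1:]
def pvCapRun (r : List Char) : List Char :=
  match r with
  | [] => []
  | c :: cs => if PySem.Chars.isspace c then c :: cs else PySem.Chars.upperChar c :: cs

def titlecase_letters_and_spaces_alt (text : String) : String :=
  let f := PySem.Chars.lower (text.toList.filter (fun ch => PySem.Chars.isalpha ch || PySem.Chars.isspace ch))
  String.ofList (((pvRuns f).map pvCapRun).flatten)

-- ===== PRECONDITION & SPEC =====
def Spec_titlecase_letters_and_spaces (text : String) (out : String) : Prop := out = titlecase_letters_and_spaces_alt text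
instance (text : String) (out : String) : Decidable (Spec_titlecase_letters_and_spaces text out) := by unfold Spec_titlecase_letters_and_spaces; infer_instance

-- ===== CLAIM (what is proved, stated in full; the proofs are below) =====
def Claim_equal_titlecase_letters_and_spaces : Prop := ∀ (text : String), Dom_titlecase_letters_and_spaces text → Spec_titlecase_letters_and_spaces text (titlecase_letters_and_spaces text)

-- ===== LEMMAS AND PROOFS =====

-- A's loop body, named for the lemmas.
def pvStep (st : List Char × Bool) (ch : Char) : List Char × Bool :=
  if st.2 && PySem.Chars.isalpha ch then (st.1 ++ [PySem.Chars.upperChar ch], false)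
  else (st.1 ++ [ch], PySem.Chars.isspace ch)

-- A letter is never whitespace (universal over Char, by the PySem definitions).
theorem pvAlphaNotSpace (c : Char) (h : PySem.Chars.isalpha c = true) :
    PySem.Chars.isspace c = false := by
  simp only [PySem.Chars.isalpha, PySem.Chars.isupper, PySem.Chars.islower, Bool.or_eq_true,
    Bool.and_eq_true, decide_eq_true_eq, Char.le_def, UInt32.le_iff_toNat_le,
    show ('A':Char).val.toNat = 65 from rfl, show ('Z':Char).val.toNat = 90 from rfl,
    show ('a':Char).val.toNat = 97 from rfl, show ('z':Char).val.toNat = 122 from rfl] at h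
  simp only [PySem.Chars.isspace, Bool.or_eq_false_iff, Bool.and_eq_false_iff,
    decide_eq_false_iff_not, show c.toNat = c.val.toNat from rfl]
  omega

theorem pvSpaceNotAlpha (c : Char) (h : PySem.Chars.isspace c = true) :
    PySem.Chars.isalpha c = false := by
  by_contra hc
  have := pvAlphaNotSpace c (by revert hc; cases PySem.Chars.isalpha c <;> simp)
  simp [this] at h

-- lowerChar keeps "letter or space": it only moves A–Z to a–z.
theorem pvLowerOk (c : Char) (h : (PySem.Chars.isalpha c || PySem.Chars.isspace c) = true) :
    (PySem.Chars.isalpha (PySem.Chars.lowerChar c) || PySem.Chars.isspace (PySem.Chars.lowerChar c)) = true := by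
  by_cases hu : PySem.Chars.isupper c = true
  · have hr : 65 ≤ c.toNat ∧ c.toNat ≤ 90 := by
      simp only [PySem.Chars.isupper, Bool.and_eq_true, decide_eq_true_eq, Char.le_def,
        UInt32.le_iff_toNat_le, show ('A':Char).val.toNat = 65 from rfl,
        show ('Z':Char).val.toNat = 90 from rfl] at hu
      exact ⟨hu.1, hu.2⟩
    have hv : (c.toNat + 32).isValidChar := Or.inl (by omega)
    have ht : (PySem.Chars.lowerChar c).toNat = c.toNat + 32 := by
      simp only [PySem.Chars.lowerChar, if_pos hu, Char.ofNat, dif_pos hv]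
      exact Char.toNat_ofNatAux hv
    have : PySem.Chars.islower (PySem.Chars.lowerChar c) = true := by
      simp only [PySem.Chars.islower, Bool.and_eq_true, decide_eq_true_eq, Char.le_def,
        UInt32.le_iff_toNat_le, show ('a':Char).val.toNat = 97 from rfl,
        show ('z':Char).val.toNat = 122 from rfl,
        show ∀ d : Char, d.val.toNat = d.toNat from fun _ => rfl, ht]
      omega
    simp [PySem.Chars.isalpha, this]
  · simp only [PySem.Chars.lowerChar, if_neg hu]
    exact h

-- every char of the lowered filtered list is a letter or a space
theorem pvFilteredOk (l : List Char) (c : Char)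
    (hc : c ∈ PySem.Chars.lower (l.filter (fun ch => PySem.Chars.isalpha ch || PySem.Chars.isspace ch))) :
    (PySem.Chars.isalpha c || PySem.Chars.isspace c) = true := by
  simp only [PySem.Chars.lower, List.mem_map, List.mem_filter] at hc
  obtain ⟨d, ⟨_, hd⟩, rfl⟩ := hc
  exact pvLowerOk d hd

-- A's loop over an all-space run appends it unchanged and ends with prev_space = true.
theorem pvSpaceRun (l : List Char) : ∀ (acc : List Char) (b : Bool),
    (∀ x ∈ l, PySem.Chars.isspace x = true) →
    l.foldl pvStep (acc, b) = (acc ++ l, if l.isEmpty then b else true) := by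
  induction l with
  | nil => intro acc b _; simp
  | cons x xs ih =>
    intro acc b hall
    have hx : PySem.Chars.isspace x = true := hall x (by simp)
    have hna : PySem.Chars.isalpha x = false := pvSpaceNotAlpha x hx
    rw [List.foldl_cons, show pvStep (acc, b) x = (acc ++ [x], true) by simp [pvStep, hna, hx]]
    rw [ih (acc ++ [x]) true (fun y hy => hall y (by simp [hy]))]
    cases xs <;> simp

-- A's loop over an all-non-space tail with prev_space = false appends it unchanged.
theorem pvWordTail (l : List Char) : ∀ (acc : List Char),
    (∀ x ∈ l, PySem.Chars.isspace x = false) →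
    l.foldl pvStep (acc, false) = (acc ++ l, false) := by
  induction l with
  | nil => intro acc _; simp
  | cons x xs ih =>
    intro acc hall
    have hx := hall x (by simp)
    rw [List.foldl_cons, show pvStep (acc, false) x = (acc ++ [x], false) by simp [pvStep, hx]]
    rw [ih (acc ++ [x]) (fun y hy => hall y (by simp [hy]))]
    simp

-- when the next char is not a letter, prev_space does not matter
theorem pvPrevIrrelevant (l : List Char) (acc : List Char)
    (h : l = [] ∨ ∃ y ys, l = y :: ys ∧ PySem.Chars.isalpha y = false) :
    (l.foldl pvStep (acc, false)).1 = (l.foldl pvStep (acc, true)).1 := by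
  rcases h with rfl | ⟨y, ys, rfl, hy⟩
  · rfl
  · simp [List.foldl_cons, pvStep, hy]

-- Main invariant: A's loop from prev_space = true produces B's run decomposition.
theorem pvMain : ∀ (n : Nat) (f : List Char) (acc : List Char), f.length ≤ n →
    (∀ c ∈ f, (PySem.Chars.isalpha c || PySem.Chars.isspace c) = true) →
    (f.foldl pvStep (acc, true)).1 = acc ++ ((pvRuns f).map pvCapRun).flatten := by
  intro n
  induction n with
  | zero => intro f acc hn _; simp [List.length_eq_zero_iff.mp (Nat.le_zero.mp hn), pvRuns]
  | succ n ih =>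
    intro f acc hn hall
    match f with
    | [] => simp [pvRuns]
    | c :: cs =>
      simp only [List.length_cons, Nat.succ_le_succ_iff] at hn
      set q : Char → Bool := fun x => PySem.Chars.isspace x == PySem.Chars.isspace c with hq
      have hsplit : cs = cs.takeWhile q ++ cs.dropWhile q := (List.takeWhile_append_dropWhile).symm
      have hdlen : (cs.dropWhile q).length ≤ n :=
        le_trans (List.dropWhile_sublist q).length_le hn
      have hdall : ∀ x ∈ cs.dropWhile q, (PySem.Chars.isalpha x || PySem.Chars.isspace x) = true :=
        fun x hx => hall x (List.mem_cons_of_mem _ ((List.dropWhile_sublist q).mem hx))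
      have hruns : pvRuns (c :: cs) = (c :: cs.takeWhile q) :: pvRuns (cs.dropWhile q) := by
        rw [pvRuns]
      by_cases hsp : PySem.Chars.isspace c = true
      · -- space run
        have hrall : ∀ x ∈ c :: cs.takeWhile q, PySem.Chars.isspace x = true := by
          intro x hx
          rcases List.mem_cons.mp hx with rfl | hx
          · exact hsp
          · have := List.mem_takeWhile_imp hx
            simpa [hq, hsp] using this
        have : (c :: cs).foldl pvStep (acc, true)
            = (cs.dropWhile q).foldl pvStep (acc ++ (c :: cs.takeWhile q), true) := by
          conv_lhs => rw [show c :: cs = (c :: cs.takeWhile q) ++ cs.dropWhile q by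
            rw [List.cons_append, ← hsplit]]
          rw [List.foldl_append, pvSpaceRun _ acc true hrall]
          simp
        rw [this, ih _ _ hdlen hdall, hruns]
        simp [pvCapRun, hsp]
      · -- word run: c is a letter
        have hsp' : PySem.Chars.isspace c = false := by revert hsp; cases PySem.Chars.isspace c <;> simp
        have hca : PySem.Chars.isalpha c = true := by
          have := hall c (by simp); simpa [hsp'] using this
        have htall : ∀ x ∈ cs.takeWhile q, PySem.Chars.isspace x = false := by
          intro x hx
          have := List.mem_takeWhile_imp hx
          simpa [hq, hsp'] using this
        have hstep1 : (c :: cs).foldl pvStep (acc, true)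
            = (cs.dropWhile q).foldl pvStep (acc ++ (PySem.Chars.upperChar c :: cs.takeWhile q), false) := by
          conv_lhs => rw [show c :: cs = c :: (cs.takeWhile q ++ cs.dropWhile q) by rw [← hsplit]]
          rw [List.foldl_cons,
            show pvStep (acc, true) c = (acc ++ [PySem.Chars.upperChar c], false) by
              simp [pvStep, hca]]
          rw [List.foldl_append, pvWordTail _ _ htall]
          simp
        have hhead : cs.dropWhile q = [] ∨
            ∃ y ys, cs.dropWhile q = y :: ys ∧ PySem.Chars.isalpha y = false := by
          match hd : cs.dropWhile q with
          | [] => exact Or.inl rfl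
          | y :: ys =>
            refine Or.inr ⟨y, ys, rfl, ?_⟩
            have hqy : q y = false := by
              have := List.head_dropWhile_not q (l := cs) (by simp [hd])
              simpa [hd] using this
            have hys : PySem.Chars.isspace y = true := by
              revert hqy; simp [hq, hsp']
            exact pvSpaceNotAlpha y hys
        rw [hstep1, pvPrevIrrelevant _ _ hhead, ih _ _ hdlen hdall, hruns]
        simp [pvCapRun, hsp']

-- ===== VERDICT (by name: the statement is the Claim_ definition above) =====
theorem titlecase_letters_and_spaces_spec : Claim_equal_titlecase_letters_and_spaces := by
  intro text _
  unfold Spec_titlecase_letters_and_spaces titlecase_letters_and_spaces titlecase_letters_and_spaces_alt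
  have h := pvMain
    (PySem.Chars.lower (text.toList.filter (fun ch => PySem.Chars.isalpha ch || PySem.Chars.isspace ch))).length
    (PySem.Chars.lower (text.toList.filter (fun ch => PySem.Chars.isalpha ch || PySem.Chars.isspace ch)))
    [] le_rfl (pvFilteredOk text.toList)
  have hb : (fun (st : List Char × Bool) ch =>
      if st.2 && PySem.Chars.isalpha ch then (st.1 ++ [PySem.Chars.upperChar ch], false)
      else (st.1 ++ [ch], PySem.Chars.isspace ch)) = pvStep := rfl
  show String.ofList ((PySem.Chars.lower (text.toList.filter
        (fun ch => PySem.Chars.isalpha ch || PySem.Chars.isspace ch))).foldl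
      (fun (st : List Char × Bool) ch =>
        if st.2 && PySem.Chars.isalpha ch then (st.1 ++ [PySem.Chars.upperChar ch], false)
        else (st.1 ++ [ch], PySem.Chars.isspace ch)) ([], true)).1
    = String.ofList (((pvRuns (PySem.Chars.lower (text.toList.filter
        (fun ch => PySem.Chars.isalpha ch || PySem.Chars.isspace ch)))).map pvCapRun).flatten)
  rw [hb, h, List.nil_append]
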